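-- pv_equiv track=rewrite | github.com/SamEthanMathew/PokerAI-Hackathon-2026 | submission/Libratus.py | _bucket_opp_discard
-- ===== SOURCE A (Python) =====
-- from collections import Counter
--
-- NUM_RANKS = 9
--
-- RANK_A = 8
--
-- def _rank(c):
--     return c % NUM_RANKS
--
-- def _suit(c):
--     return c // NUM_RANKS
--
-- def _bucket_opp_discard(opp_discards):
--     if len(opp_discards) < 3:
--         return "unknown"
--     ranks = [_rank(c) for c in opp_discards]
--     suits = [_suit(c) for c in opp_discards]
--     sc = Counter(suits)
--     rc = Counter(ranks)
--     has_pair = rc.most_common(1)[0][1] >= 2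
--     max_sc = sc.most_common(1)[0][1]
--     has_ace = RANK_A in ranks
--
--     sorted_r = sorted(ranks)
--     conn = 0
--     for i in range(len(sorted_r) - 1):
--         if sorted_r[i + 1] - sorted_r[i] == 1:
--             conn += 1
--     if RANK_A in sorted_r and 0 in sorted_r:
--         conn += 1
--
--     if has_pair:
--         return "discarded_pair"
--     if max_sc >= 2:
--         return "suited_cluster"
--     if conn >= 2:
--         return "connected_cluster"
--     if has_ace:
--         return "high_junk"
--     if max(ranks) <= 5:
--         return "low_junk"
--     return "mixed_discard"
-- ===== SOURCE B (Python) =====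
-- def _bucket_opp_discard(opp_discards):
--     if len(opp_discards) < 3:
--         return "unknown"
--     ranks = [c % 9 for c in opp_discards]
--     rank_set = set(ranks)
--     if len(rank_set) < len(ranks):
--         return "discarded_pair"
--     suit_set = set(c // 9 for c in opp_discards)
--     if len(suit_set) < len(opp_discards):
--         return "suited_cluster"
--     conn = sum(1 for r in rank_set if r + 1 in rank_set)
--     if 8 in rank_set and 0 in rank_set:
--         conn += 1
--     if conn >= 2:
--         return "connected_cluster"
--     if 8 in rank_set:
--         return "high_junk"
--     if max(ranks) <= 5:
--         return "low_junk"
--     return "mixed_discard"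
-- ===== Notes on version B (the rewrite author's own statement) =====
-- stated objective: simpler
-- what changed: B drops both Counters (duplicate ranks/suits are detected by comparing the list length with the number of distinct elements) and replaces the sort-then-adjacent-scan connectivity count by a rank-set membership count (r and r+1 both present), which is equal whenever no rank repeats - the only case in which the count is used.
import Mathlib
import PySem

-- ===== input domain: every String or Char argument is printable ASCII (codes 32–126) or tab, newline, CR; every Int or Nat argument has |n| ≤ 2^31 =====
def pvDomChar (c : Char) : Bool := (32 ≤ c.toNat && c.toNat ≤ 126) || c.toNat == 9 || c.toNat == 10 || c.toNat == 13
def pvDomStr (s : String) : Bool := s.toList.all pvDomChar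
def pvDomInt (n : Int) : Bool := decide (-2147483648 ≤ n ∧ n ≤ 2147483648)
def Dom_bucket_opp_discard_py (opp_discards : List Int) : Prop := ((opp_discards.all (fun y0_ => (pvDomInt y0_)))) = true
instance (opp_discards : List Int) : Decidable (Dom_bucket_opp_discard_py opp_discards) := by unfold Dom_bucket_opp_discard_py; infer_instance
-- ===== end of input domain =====

-- B replaces A's two Counters by distinct-element counts and the sort-then-adjacent-scan by a
-- rank-set membership count (simpler: no Counter, no sort); return values are identical.

-- ===== PORT A =====
-- Counter(xs).most_common(1)[0][1]: items sorted by count descending (stable), first item's count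
def pvMostCommonCount (d : PySem.Dict Int Int) : Int :=
  ((PySem.List.sorted d.items (fun p => p.2) true).headD (0, 0)).2

def bucket_opp_discard_py (opp_discards : List Int) : String :=
  if opp_discards.length < 3 then "unknown" else
  let ranks := opp_discards.map (fun c => PySem.Int.mod c 9)
  let suits := opp_discards.map (fun c => PySem.Int.floordiv c 9)
  let sc := PySem.Dict.counter suits
  let rc := PySem.Dict.counter ranks
  let has_pair := 2 ≤ pvMostCommonCount rc
  let max_sc := pvMostCommonCount sc
  let has_ace := (8 : Int) ∈ ranks
  let sorted_r := PySem.List.sorted ranks (fun x => x) false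
  let conn0 : Int := (PySem.List.pyRange 0 ((sorted_r.length : Int) - 1) 1).foldl
      (fun conn i => if PySem.List.pyGetD sorted_r (i + 1) 0 - PySem.List.pyGetD sorted_r i 0 = 1
                     then conn + 1 else conn) 0
  let conn : Int := if (8 : Int) ∈ sorted_r ∧ (0 : Int) ∈ sorted_r then conn0 + 1 else conn0
  if has_pair then "discarded_pair"
  else if 2 ≤ max_sc then "suited_cluster"
  else if 2 ≤ conn then "connected_cluster"
  else if has_ace then "high_junk"
  else if (PySem.List.max? ranks (fun x => x)).getD 0 ≤ 5 then "low_junk"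
  else "mixed_discard"

-- ===== PORT B =====
def bucket_opp_discard_py_alt (opp_discards : List Int) : String :=
  if opp_discards.length < 3 then "unknown" else
  let ranks := opp_discards.map (fun c => PySem.Int.mod c 9)
  let rank_set : PySem.Set Int := PySem.Set.ofList ranks
  if rank_set.length < ranks.length then "discarded_pair" else
  let suit_set : PySem.Set Int := PySem.Set.ofList (opp_discards.map (fun c => PySem.Int.floordiv c 9))
  if suit_set.length < opp_discards.length then "suited_cluster" else
  let conn : Int := (rank_set.countP (fun r => PySem.Set.contains rank_set (r + 1)) : Int)
      + (if PySem.Set.contains rank_set 8 && PySem.Set.contains rank_set 0 then 1 else 0)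
  if 2 ≤ conn then "connected_cluster"
  else if PySem.Set.contains rank_set 8 then "high_junk"
  else if (PySem.List.max? ranks (fun x => x)).getD 0 ≤ 5 then "low_junk"
  else "mixed_discard"

-- ===== PRECONDITION & SPEC =====
def Spec_bucket_opp_discard_py (opp_discards : List Int) (out : String) : Prop := out = bucket_opp_discard_py_alt opp_discards
instance (opp_discards : List Int) (out : String) : Decidable (Spec_bucket_opp_discard_py opp_discards out) := by unfold Spec_bucket_opp_discard_py; infer_instance

-- ===== CLAIM (what is proved, stated in full; the proofs are below) =====
def Claim_equal_bucket_opp_discard_py : Prop := ∀ (opp_discards : List Int), Dom_bucket_opp_discard_py opp_discards → Spec_bucket_opp_discard_py opp_discards (bucket_opp_discard_py opp_discards)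

-- ===== LEMMAS AND PROOFS =====

-- A's most_common(1)[0][1] ≥ 2 says exactly: some element repeats.
theorem pvMostCommon_ge_two_iff (xs : List Int) (h : xs ≠ []) :
    2 ≤ pvMostCommonCount (PySem.Dict.counter xs) ↔ ¬ xs.Nodup := by
  unfold pvMostCommonCount
  have hsne : PySem.List.sorted (PySem.Dict.counter xs).items (fun p : Int × Int => p.2) true ≠ [] := by
    rw [Ne, PySem.List.sorted_eq_nil_iff, PySem.Dict.items_counter]
    simp only [List.map_eq_nil_iff]
    intro hnil
    exact h (List.eq_nil_iff_forall_not_mem.mpr (fun a ha =>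
      (List.eq_nil_iff_forall_not_mem.mp hnil a) ((PySem.Set.mem_ofList xs a).mpr ha)))
  obtain ⟨m, t, hmt⟩ := List.exists_cons_of_ne_nil hsne
  rw [hmt]
  simp only [List.headD_cons]
  have hmax := PySem.List.key_head_sorted_rev_ge (PySem.Dict.counter xs).items (fun p : Int × Int => p.2) hmt
  have hm_mem : m ∈ (PySem.Dict.counter xs).items := by
    have hms : m ∈ PySem.List.sorted (PySem.Dict.counter xs).items (fun p : Int × Int => p.2) true := by
      rw [hmt]; exact List.mem_cons_self
    exact (PySem.List.mem_sorted _ _ _ _).mp hms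
  constructor
  · intro h2 hnd
    rw [PySem.Dict.items_counter] at hm_mem
    obtain ⟨k, hk, hkm⟩ := List.mem_map.mp hm_mem
    have hc := List.nodup_iff_count_le_one.mp hnd k
    rw [← hkm] at h2
    simp only at h2
    omega
  · intro hnd
    obtain ⟨k, hk⟩ : ∃ k, 2 ≤ List.count k xs := by
      by_contra hc
      push Not at hc
      exact hnd (List.nodup_iff_count_le_one.mpr (fun a => by have := hc a; omega))
    have hkx : k ∈ xs := List.count_pos_iff.mp (by omega)
    have hmem : (k, (List.count k xs : Int)) ∈ (PySem.Dict.counter xs).items := by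
      rw [PySem.Dict.items_counter]
      exact List.mem_map_of_mem ((PySem.Set.mem_ofList xs k).mpr hkx)
    have hle := hmax _ hmem
    simp only at hle
    omega

-- B's duplicate test: the distinct-element list is shorter iff there is a repeat.
theorem pvOfList_length_lt_iff (xs : List Int) :
    (PySem.Set.ofList xs).length < xs.length ↔ ¬ xs.Nodup := by
  induction xs with
  | nil => simp [PySem.Set.ofList]
  | cons x t ih =>
    rw [PySem.Set.ofList_cons]
    by_cases hx : x ∈ t
    · constructor
      · intro _; simp [List.nodup_cons, hx]
      · intro _
        have h1 : ((PySem.Set.ofList t).discard x).length < (PySem.Set.ofList t).length := by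
          unfold PySem.Set.discard
          rw [List.length_filter_lt_length_iff_exists]
          exact ⟨x, (PySem.Set.mem_ofList t x).mpr hx, by simp⟩
        have h2 := PySem.Set.length_ofList_le t
        simp only [List.length_cons]
        omega
    · have hd : (PySem.Set.ofList t).discard x = PySem.Set.ofList t := by
        unfold PySem.Set.discard
        apply List.filter_eq_self.mpr
        intro y hy
        have hyt : y ∈ t := (PySem.Set.mem_ofList t y).mp hy
        have hne : y ≠ x := fun he => hx (he ▸ hyt)
        simp [hne]
      rw [hd]
      simp only [List.length_cons, List.nodup_cons]
      constructor
      · intro hlt hn; exact (ih.mp (by omega)) hn.2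
      · intro hn
        have hnt : ¬ t.Nodup := by tauto
        have := ih.mpr hnt; omega

-- On a strictly increasing list, counting adjacent gaps of 1 = counting members whose successor is a member.
theorem pvAdj_eq_countP : ∀ (s : List Int), s.Pairwise (· < ·) →
    (List.range (s.length - 1)).countP
        (fun k => decide (s.getD (k + 1) 0 - s.getD k 0 = 1))
      = s.countP (fun r => decide ((r + 1) ∈ s))
  | [], _ => by simp
  | [a], _ => by simp
  | a :: b :: t', hs => by
    obtain ⟨hgt, htail⟩ := List.pairwise_cons.mp hs
    obtain ⟨hgtb, _⟩ := List.pairwise_cons.mp htail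
    have hab : a < b := hgt _ List.mem_cons_self
    have IH := pvAdj_eq_countP (b :: t') htail
    have hmemb : ((a + 1) ∈ a :: b :: t') ↔ b - a = 1 := by
      simp only [List.mem_cons]
      constructor
      · rintro (h | h | h)
        · omega
        · omega
        · have := hgtb _ h
          omega
      · intro h; right; left; omega
    have hL : (List.range ((a :: b :: t').length - 1)).countP
        (fun k => decide ((a :: b :: t').getD (k + 1) 0 - (a :: b :: t').getD k 0 = 1))
        = (List.range ((b :: t').length - 1)).countP
            (fun k => decide ((b :: t').getD (k + 1) 0 - (b :: t').getD k 0 = 1))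
          + (if b - a = 1 then 1 else 0) := by
      simp only [List.length_cons, Nat.add_sub_cancel]
      rw [List.range_succ_eq_map, List.countP_cons, List.countP_map]
      congr 1
      simp
    have hR : (a :: b :: t').countP (fun r => decide ((r + 1) ∈ a :: b :: t'))
        = (b :: t').countP (fun r => decide ((r + 1) ∈ b :: t'))
          + (if b - a = 1 then 1 else 0) := by
      rw [List.countP_cons]
      have hcong : (b :: t').countP (fun r => decide ((r + 1) ∈ a :: b :: t'))
          = (b :: t').countP (fun r => decide ((r + 1) ∈ b :: t')) := by
        apply List.countP_congr
        intro r hr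
        have hra : a < r := hgt _ hr
        simp only [decide_eq_true_eq, List.mem_cons]
        constructor
        · rintro (h | h)
          · exfalso; omega
          · exact h
        · intro h; exact Or.inr h
      rw [hcong]
      congr 1
      simp only [decide_eq_true_eq]
      rw [if_congr hmemb rfl rfl]
    rw [hL, hR, IH]

-- A's conn loop as a countP over List.range.
theorem pvConn0_eq (s : List Int) :
    ((PySem.List.pyRange 0 ((s.length : Int) - 1) 1).foldl
      (fun conn i => if PySem.List.pyGetD s (i + 1) 0 - PySem.List.pyGetD s i 0 = 1 then conn + 1 else conn) (0 : Int))
    = ((List.range (s.length - 1)).countP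
        (fun k => decide (s.getD (k + 1) 0 - s.getD k 0 = 1)) : Int) := by
  have h1 : (fun (conn : Int) (i : Int) => if PySem.List.pyGetD s (i + 1) 0 - PySem.List.pyGetD s i 0 = 1 then conn + 1 else conn)
      = (fun (conn : Int) (i : Int) => if (fun i => decide (PySem.List.pyGetD s (i + 1) 0 - PySem.List.pyGetD s i 0 = 1)) i = true then conn + 1 else conn) := by
    funext conn i; simp
  rw [h1, PySem.List.foldl_count_if, PySem.List.pyRange_one, List.countP_map]
  simp only [zero_add]
  have h2 : ((s.length : Int) - 1 - 0).toNat = s.length - 1 := by omega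
  rw [h2]
  congr 1
  apply List.countP_congr
  intro k hk
  simp only [Function.comp_apply]
  have c1 : ((k : Int) + 1) = ((k + 1 : Nat) : Int) := by push_cast; ring
  rw [c1, PySem.List.pyGetD_natCast, PySem.List.pyGetD_natCast]

-- ===== VERDICT (by name: the statement is the Claim_ definition above) =====
theorem bucket_opp_discard_py_spec : Claim_equal_bucket_opp_discard_py := by
  intro xs _
  unfold Spec_bucket_opp_discard_py bucket_opp_discard_py bucket_opp_discard_py_alt
  by_cases hlen : xs.length < 3
  · simp [hlen]
  · simp only [if_neg hlen]
    have hxs : xs ≠ [] := fun h => by rw [h] at hlen; simp at hlen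
    have hrne : xs.map (fun c => PySem.Int.mod c 9) ≠ [] :=
      fun h => hxs (List.map_eq_nil_iff.mp h)
    have hfne : xs.map (fun c => PySem.Int.floordiv c 9) ≠ [] :=
      fun h => hxs (List.map_eq_nil_iff.mp h)
    by_cases hnd : (xs.map (fun c => PySem.Int.mod c 9)).Nodup
    · rw [if_neg (fun h => (pvMostCommon_ge_two_iff _ hrne).mp h hnd),
         if_neg (fun h => (pvOfList_length_lt_iff _).mp h hnd)]
      by_cases hnds : (xs.map (fun c => PySem.Int.floordiv c 9)).Nodup
      · have hB2 : ¬ (List.length (PySem.Set.ofList (List.map (fun c => PySem.Int.floordiv c 9) xs)) < xs.length) := by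
          intro h
          exact (pvOfList_length_lt_iff _).mp (by rw [List.length_map]; exact h) hnds
        rw [if_neg (fun h => (pvMostCommon_ge_two_iff _ hfne).mp h hnds), if_neg hB2]
        set R := xs.map (fun c => PySem.Int.mod c 9) with hRdef
        rw [PySem.Set.ofList_eq_self_of_nodup R hnd]
        set S := PySem.List.sorted R (fun x => x) false with hSdef
        have hperm : S.Perm R := PySem.List.sorted_perm R (fun x => x) false
        have hSnd : S.Nodup := hperm.nodup_iff.mpr hnd
        have hle : S.Pairwise (· ≤ ·) := PySem.List.sorted_pairwise R (fun x => x)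
        have hlt : S.Pairwise (· < ·) :=
          (hle.and hSnd).imp (fun h => lt_of_le_of_ne h.1 h.2)
        have hconn : ((PySem.List.pyRange 0 ((S.length : Int) - 1) 1).foldl
              (fun conn i => if PySem.List.pyGetD S (i + 1) 0 - PySem.List.pyGetD S i 0 = 1 then conn + 1 else conn) (0 : Int))
            = ((R.countP (fun r => PySem.Set.contains R (r + 1)) : Nat) : Int) := by
          rw [pvConn0_eq, pvAdj_eq_countP S hlt]
          congr 1
          have e1 : S.countP (fun r => decide ((r + 1) ∈ S)) = S.countP (fun r => decide ((r + 1) ∈ R)) :=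
            List.countP_congr (fun r _ => by simp [hSdef, PySem.List.mem_sorted])
          have e2 : S.countP (fun r => decide ((r + 1) ∈ R)) = R.countP (fun r => decide ((r + 1) ∈ R)) :=
            hperm.countP_eq _
          have e3 : R.countP (fun r => decide ((r + 1) ∈ R)) = R.countP (fun r => PySem.Set.contains R (r + 1)) :=
            List.countP_congr (fun r _ => by simp)
          rw [e1, e2, e3]
        rw [hconn]
        have hw : ((8 : Int) ∈ S ∧ (0 : Int) ∈ S) ↔ ((PySem.Set.contains R 8 && PySem.Set.contains R 0) = true) := by
          simp [hSdef, PySem.List.mem_sorted, Bool.and_eq_true]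
        have hace : (((8 : Int) ∈ R) ↔ (PySem.Set.contains R 8 = true)) := by
          simp
        have hA : (if ((8 : Int) ∈ S ∧ (0 : Int) ∈ S)
              then ((R.countP (fun r => PySem.Set.contains R (r + 1)) : Nat) : Int) + 1
              else ((R.countP (fun r => PySem.Set.contains R (r + 1)) : Nat) : Int))
            = ((R.countP (fun r => PySem.Set.contains R (r + 1)) : Nat) : Int)
              + (if (PySem.Set.contains R 8 && PySem.Set.contains R 0) = true then 1 else 0) := by
          by_cases hc : ((8 : Int) ∈ S ∧ (0 : Int) ∈ S)
          · rw [if_pos hc, if_pos (hw.mp hc)]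
          · rw [if_neg hc, if_neg (fun h => hc (hw.mpr h))]
            ring
        rw [hA]
        exact if_congr Iff.rfl rfl (if_congr hace rfl rfl)
      · have hB2 : List.length (PySem.Set.ofList (List.map (fun c => PySem.Int.floordiv c 9) xs)) < xs.length := by
          have h := (pvOfList_length_lt_iff (List.map (fun c => PySem.Int.floordiv c 9) xs)).mpr hnds
          rwa [List.length_map] at h
        rw [if_pos ((pvMostCommon_ge_two_iff _ hfne).mpr hnds), if_pos hB2]
    · rw [if_pos ((pvMostCommon_ge_two_iff _ hrne).mpr hnd),
         if_pos ((pvOfList_length_lt_iff _).mpr hnd)]
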